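-- pv_equiv track=rewrite | github.com/Abjad/abjad | abjad/tools/sequencetools/retain_sequence_elements_at_indices_cyclically.py | retain_sequence_elements_at_indices_cyclically
-- ===== SOURCE A (Python) =====
-- def retain_sequence_elements_at_indices_cyclically(
--     sequence,
--     indices,
--     period,
--     offset=0,
--     ):
--     '''Retains `sequence` elements at `indices` mod `period` plus `offset`.
--
--     ::
--
--         >>> sequencetools.retain_sequence_elements_at_indices_cyclically(range(20), [0, 1], 5, 3)
--         [3, 4, 8, 9, 13, 14, 18, 19]
--
--     Ignores negative values in `indices`.
--
--     Returns list.
--     '''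
--
--     result = []
--
--     for i, element in enumerate(sequence):
--         if (i - offset) % period in indices:
--             result.append(element)
--
--     return result
-- ===== SOURCE B (Python) =====
-- def retain_sequence_elements_at_indices_cyclically(
--     sequence,
--     indices,
--     period,
--     offset=0,
--     ):
--     '''Retains `sequence` elements at `indices` mod `period` plus `offset`,
--     via a precomputed keep mask and a wrapping cursor.'''
--     p = abs(period)
--     keep = set(indices)
--     mask = [((j - offset) % period) in keep for j in range(min(p, len(sequence)))]
--     result = []
--     r = 0
--     for element in sequence:
--         if mask[r]:
--             result.append(element)
--         r += 1
--         if r == p: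
--             r = 0
--     return result
-- ===== Notes on version B (the rewrite author's own statement) =====
-- stated objective: faster
-- what changed: B precomputes a min(|period|,n)-length boolean keep mask once (set membership instead of list scans) and selects elements in a single pass with a wrapping cursor, removing the per-element modulo and O(m) indices scan of A.
import Mathlib
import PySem

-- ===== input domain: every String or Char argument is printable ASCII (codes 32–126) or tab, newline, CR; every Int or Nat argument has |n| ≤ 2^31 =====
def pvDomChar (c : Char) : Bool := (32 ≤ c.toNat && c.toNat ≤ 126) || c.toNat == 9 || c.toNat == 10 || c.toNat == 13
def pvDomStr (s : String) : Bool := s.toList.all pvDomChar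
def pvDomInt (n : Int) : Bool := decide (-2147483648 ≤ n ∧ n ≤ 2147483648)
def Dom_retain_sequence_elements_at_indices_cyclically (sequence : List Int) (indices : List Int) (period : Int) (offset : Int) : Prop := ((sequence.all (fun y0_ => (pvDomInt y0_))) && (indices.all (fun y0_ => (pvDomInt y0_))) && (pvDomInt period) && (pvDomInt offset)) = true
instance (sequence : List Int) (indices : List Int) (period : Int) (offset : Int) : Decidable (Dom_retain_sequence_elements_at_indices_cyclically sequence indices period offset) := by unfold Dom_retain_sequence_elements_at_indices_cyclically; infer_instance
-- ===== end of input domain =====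

-- B replaces the per-element '(i - offset) % period in indices' test by a precomputed
-- boolean keep mask consulted through a wrapping cursor (cyclic-selection table; no modulo
-- or membership scan inside the element loop).

-- ===== PORT A =====
-- for i, element in enumerate(sequence): if (i - offset) % period in indices: result.append(element)
def retain_sequence_elements_at_indices_cyclically (sequence : List Int) (indices : List Int) (period : Int) (offset : Int) : List Int :=
  (PySem.List.enumerate sequence 0).foldl
    (fun result ie =>
      if PySem.Int.mod (ie.1 - offset) period ∈ indices then result ++ [ie.2] else result)
    []

-- ===== PORT B =====
-- mask = [((j - offset) % period) in keep for j in range(min(p, len(sequence)))]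
def pvMask (indices : List Int) (period : Int) (offset : Int) (q : Nat) : List Bool :=
  (PySem.List.pyRange 0 (q : Int)).map
    (fun j => decide (PySem.Int.mod (j - offset) period ∈ PySem.Set.ofList indices))

-- the element loop of Source B: consult mask[r], advance the cursor, wrap at p.
-- (In Python mask[r] raises IndexError when out of range — that happens only when
-- period == 0 with a non-empty sequence, which Pre_ excludes; the port uses a
-- default there, exact on every admitted input.)
def pvCycleLoop (mask : List Bool) (p : Nat) : List Int → Nat → List Int → List Int
  | [], _, result => result
  | x :: xs, r, result =>
      let result' := if PySem.List.pyGetD mask (r : Int) false then result ++ [x] else result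
      let r' := r + 1
      pvCycleLoop mask p xs (if r' = p then 0 else r') result'

def retain_sequence_elements_at_indices_cyclically_alt (sequence : List Int) (indices : List Int) (period : Int) (offset : Int) : List Int :=
  let p := period.natAbs
  pvCycleLoop (pvMask indices period offset (min p sequence.length)) p sequence 0 []

-- ===== PRECONDITION & SPEC =====
-- Pre_ excludes only the inputs where A raises ZeroDivisionError: period == 0 with a
-- non-empty sequence (B raises there too, an IndexError on the empty mask).
def Pre_retain_sequence_elements_at_indices_cyclically (sequence : List Int) (indices : List Int) (period : Int) (offset : Int) : Prop :=
  period ≠ 0 ∨ sequence = []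
instance (sequence : List Int) (indices : List Int) (period : Int) (offset : Int) : Decidable (Pre_retain_sequence_elements_at_indices_cyclically sequence indices period offset) := by unfold Pre_retain_sequence_elements_at_indices_cyclically; infer_instance

def pvWitness_retain_sequence_elements_at_indices_cyclically : List Int × List Int × Int × Int := ([3, 4, 5, 6, 7], [0, 1], 3, 1)

def Spec_retain_sequence_elements_at_indices_cyclically (sequence : List Int) (indices : List Int) (period : Int) (offset : Int) (out : List Int) : Prop := out = retain_sequence_elements_at_indices_cyclically_alt sequence indices period offset
instance (sequence : List Int) (indices : List Int) (period : Int) (offset : Int) (out : List Int) : Decidable (Spec_retain_sequence_elements_at_indices_cyclically sequence indices period offset out) := by unfold Spec_retain_sequence_elements_at_indices_cyclically; infer_instance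

-- ===== CLAIM (what is proved, stated in full; the proofs are below) =====
def Claim_equal_retain_sequence_elements_at_indices_cyclically : Prop := ∀ (sequence : List Int) (indices : List Int) (period : Int) (offset : Int), Dom_retain_sequence_elements_at_indices_cyclically sequence indices period offset → Pre_retain_sequence_elements_at_indices_cyclically sequence indices period offset → Spec_retain_sequence_elements_at_indices_cyclically sequence indices period offset (retain_sequence_elements_at_indices_cyclically sequence indices period offset)

-- ===== LEMMAS AND PROOFS =====

-- Python's mod is unchanged by shifting the dividend by a multiple of the divisor.
theorem pv_mod_shift (b : Int) (hb : b ≠ 0) (a1 a2 : Int) (h : b ∣ (a2 - a1)) :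
    PySem.Int.mod a1 b = PySem.Int.mod a2 b := by
  have h1 := PySem.Int.floordiv_mul_add_mod a1 b
  have h2 := PySem.Int.floordiv_mul_add_mod a2 b
  obtain ⟨c, hc⟩ := h
  have hd : PySem.Int.mod a2 b - PySem.Int.mod a1 b
      = b * (c + PySem.Int.floordiv a1 b - PySem.Int.floordiv a2 b) := by ring_nf; nlinarith [h1, h2, hc]
  rcases lt_or_gt_of_ne hb with hneg | hpos
  · have b1 := PySem.Int.mod_neg_bounds a1 hneg
    have b2 := PySem.Int.mod_neg_bounds a2 hneg
    set m := c + PySem.Int.floordiv a1 b - PySem.Int.floordiv a2 b with hm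
    have hm0 : m = 0 := by nlinarith [b1.1, b1.2, b2.1, b2.2, hd]
    rw [hm0, mul_zero] at hd; omega
  · have b1l := PySem.Int.mod_nonneg a1 hpos
    have b1u := PySem.Int.mod_lt a1 hpos
    have b2l := PySem.Int.mod_nonneg a2 hpos
    have b2u := PySem.Int.mod_lt a2 hpos
    set m := c + PySem.Int.floordiv a1 b - PySem.Int.floordiv a2 b with hm
    have hm0 : m = 0 := by nlinarith
    rw [hm0, mul_zero] at hd; omega

theorem pv_cursor_step (p k : Nat) (hp : 0 < p) :
    (if k % p + 1 = p then 0 else k % p + 1) = (k + 1) % p := by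
  have hdm := Nat.div_add_mod k p
  split_ifs with heq
  · rw [show k + 1 = p * (k / p + 1) from by rw [Nat.mul_succ]; omega, Nat.mul_mod_right]
  · have hlt : k % p + 1 < p := Nat.lt_of_le_of_ne (Nat.mod_lt k hp) heq
    rw [show k + 1 = (k % p + 1) + p * (k / p) by omega, Nat.add_mul_mod_self_left,
      Nat.mod_eq_of_lt hlt]

theorem pv_mask_get (indices : List Int) (period offset : Int) (q r : Nat)
    (hr : r < q) :
    PySem.List.pyGetD (pvMask indices period offset q) (r : Int) false
      = decide (PySem.Int.mod ((r : Int) - offset) period ∈ indices) := by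
  unfold pvMask
  rw [PySem.List.pyGetD_map_pyRange _ q r false hr]
  simp [PySem.Set.mem_ofList]

theorem pv_loop_eq (indices : List Int) (period offset : Int) (hp : period ≠ 0)
    (n : Nat) (seq : List Int) : ∀ (k : Nat) (acc : List Int),
    (k % period.natAbs + seq.length ≤ n ∨ period.natAbs ≤ n) →
    pvCycleLoop (pvMask indices period offset (min period.natAbs n)) period.natAbs seq (k % period.natAbs) acc
      = (PySem.List.enumerate seq (k : Int)).foldl
          (fun result ie =>
            if PySem.Int.mod (ie.1 - offset) period ∈ indices then result ++ [ie.2] else result)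
          acc := by
  induction seq with
  | nil => intro k acc _; simp [pvCycleLoop, PySem.List.enumerate_nil]
  | cons x xs ih =>
    intro k acc hH
    have hp0 : 0 < period.natAbs := Int.natAbs_pos.mpr hp
    have hrlt : k % period.natAbs < period.natAbs := Nat.mod_lt k hp0
    have hq : k % period.natAbs < min period.natAbs n := by
      rcases hH with h | h
      · simp only [List.length_cons] at h
        exact Nat.lt_min.mpr ⟨hrlt, by omega⟩
      · rw [Nat.min_eq_left h]; exact hrlt
    have hH' : (k + 1) % period.natAbs + xs.length ≤ n ∨ period.natAbs ≤ n := by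
      rcases hH with h | h
      · left
        have hb : (k + 1) % period.natAbs ≤ k % period.natAbs + 1 := by
          rw [← pv_cursor_step period.natAbs k hp0]; split_ifs <;> omega
        simp only [List.length_cons] at h
        omega
      · right; exact h
    rw [PySem.List.enumerate_cons x xs (k : Int)]
    simp only [pvCycleLoop, List.foldl_cons]
    rw [pv_mask_get indices period offset _ _ hq]
    have hmod : PySem.Int.mod ((k % period.natAbs : Nat) - offset) period
        = PySem.Int.mod ((k : Int) - offset) period := by
      apply pv_mod_shift period hp
      have : (period.natAbs : Int) ∣ ((k : Int) - (k % period.natAbs : Nat)) := by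
        have := Nat.div_add_mod k period.natAbs
        refine ⟨(k / period.natAbs : Nat), ?_⟩
        have hint : (period.natAbs : Int) * ((k / period.natAbs : Nat) : Int)
            + ((k % period.natAbs : Nat) : Int) = (k : Int) := by
          exact_mod_cast Nat.div_add_mod k period.natAbs
        linarith [hint]
      have h2 : period ∣ ((k : Int) - (k % period.natAbs : Nat)) := Int.natAbs_dvd.mp this
      have : ((k : Int) - offset) - ((k % period.natAbs : Nat) - offset)
          = (k : Int) - (k % period.natAbs : Nat) := by ring
      rw [this]; exact h2
    rw [hmod, pv_cursor_step period.natAbs k hp0]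
    rw [show ((k : Int) + 1) = ((k + 1 : Nat) : Int) by push_cast; ring]
    by_cases hmem : PySem.Int.mod ((k : Int) - offset) period ∈ indices
    · simp only [hmem, decide_true, if_true]
      exact ih (k + 1) (acc ++ [x]) hH'
    · simp only [hmem, decide_false, if_false]
      exact ih (k + 1) acc hH'

-- ===== VERDICT (by name: the statement is the Claim_ definition above) =====
theorem retain_sequence_elements_at_indices_cyclically_spec : Claim_equal_retain_sequence_elements_at_indices_cyclically := by
  intro sequence indices period offset _ hpre
  unfold Spec_retain_sequence_elements_at_indices_cyclically
  unfold retain_sequence_elements_at_indices_cyclically retain_sequence_elements_at_indices_cyclically_alt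
  by_cases hz : period = 0
  · rcases hpre with h | h
    · exact absurd hz h
    · subst h; simp [pvCycleLoop, PySem.List.enumerate_nil]
  · have := pv_loop_eq indices period offset hz sequence.length sequence 0 []
      (by left; rw [Nat.zero_mod]; omega)
    rw [Nat.zero_mod] at this
    rw [show ((0 : Nat) : Int) = 0 from rfl] at this
    exact this.symm
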